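-- pv_equiv track=rewrite | github.com/AbdulmalikAlayande/amala-atlas-auto-discovery | apps/core/nlp/fields.py | find_city_hits
-- ===== SOURCE A (Python) =====
-- def find_city_hits(text, target_cities: list[str]) -> list[dict]:
--     if not text: return []
--     low = text.lower()
--     results = []
--     for city in target_cities:
--         if city.lower() in low:
--             start = low.find(city.lower())
--             snippet = text[max(0, start - 50):min(len(text), start + len(city) + 50)].strip()
--             results.append({"value": city, "snippet": snippet})
--     return results
-- ===== SOURCE B (Python) =====
-- def find_city_hits(text, target_cities: list[str]) -> list[dict]:
--     # Single left-to-right pass over the text: patterns (distinct, lowercased) are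
--     # bucketed by their first character; at each position only the bucket of the
--     # current character is tested, and each pattern's first position is recorded in
--     # a table; the scan stops as soon as every pattern has been found.  The result
--     # list is then assembled from the table, in the order of the input list.
--     if not text:
--         return []
--     low = text.lower()
--     n = len(low)
--     pending = {c.lower() for c in target_cities}
--     pos = {}
--     if "" in pending:
--         pos[""] = 0
--         pending.discard("")
--     buckets = {}
--     for p in pending:
--         buckets.setdefault(p[0], []).append(p)
--     i = 0
--     while i < n and pending:
--         for p in [q for q in buckets.get(low[i], ()) if q in pending and low.startswith(q, i)]:
--             pos[p] = i
--             pending.discard(p)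
--         i += 1
--
--     def entry(city):
--         start = pos[city.lower()]
--         lo = max(0, start - 50)
--         hi = min(len(text), start + len(city) + 50)
--         return {"value": city, "snippet": text[lo:hi].strip()}
--
--     return [entry(city) for city in target_cities if city.lower() in pos]
-- ===== Notes on version B (the rewrite author's own statement) =====
-- stated objective: alternative
-- what changed: A scans the whole text once per city (substring test plus find per city); B buckets the distinct lowercased patterns by first character, makes a single left-to-right pass over the text testing only the bucket of the current character, records each pattern's first position in a dict, stops once all are found, and assembles the results in input-list order from that table.
import Mathlib
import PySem

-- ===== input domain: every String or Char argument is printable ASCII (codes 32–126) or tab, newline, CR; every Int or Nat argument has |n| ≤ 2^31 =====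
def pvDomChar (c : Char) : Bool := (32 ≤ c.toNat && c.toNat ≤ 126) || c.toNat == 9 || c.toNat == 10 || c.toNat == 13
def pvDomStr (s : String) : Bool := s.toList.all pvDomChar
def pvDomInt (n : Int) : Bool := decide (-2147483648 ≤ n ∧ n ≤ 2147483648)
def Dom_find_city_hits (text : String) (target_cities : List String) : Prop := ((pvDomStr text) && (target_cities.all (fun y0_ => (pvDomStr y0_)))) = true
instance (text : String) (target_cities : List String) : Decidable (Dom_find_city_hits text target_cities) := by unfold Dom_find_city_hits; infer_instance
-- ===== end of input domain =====

-- B replaces A's per-city scan of the whole text by ONE left-to-right pass over the text that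
-- records the first position of every distinct lowercased pattern (objective: alternative algorithm).

-- ===== PORT A =====
def find_city_hits (text : String) (target_cities : List String) : List (List (String × String)) :=
  if text.toList = [] then []
  else
    let low := PySem.Chars.lower text.toList
    target_cities.foldl (fun results city =>
      if PySem.Chars.isIn (PySem.Chars.lower city.toList) low then
        let start := PySem.Chars.find low (PySem.Chars.lower city.toList)
        let snippet := PySem.Chars.strip (PySem.List.slice text.toList
          (some (max 0 (start - 50)))
          (some (min (text.toList.length : Int) (start + (city.toList.length : Int) + 50))))
        results ++ [[("value", city), ("snippet", String.ofList snippet)]]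
      else results) []

-- ===== PORT B =====
-- the 'while i < n and pending' loop of Source B; low.startswith(q, i) with 0 ≤ i ≤ n is exactly
-- PySem.Chars.startswith (low.drop i) q; buckets.get(low[i], ()) is buckets.getD low[i] []
def pvScan (low : List Char) (buckets : PySem.Dict Char (List (List Char))) (i : Nat)
    (pending : PySem.Set (List Char)) (pos : PySem.Dict (List Char) Int) :
    PySem.Dict (List Char) Int :=
  if h : i < low.length ∧ pending ≠ [] then
    let found := (buckets.getD (low[i]'h.1) []).filter
      (fun q => pending.contains q && PySem.Chars.startswith (low.drop i) q)
    let st := found.foldl (fun st p => (st.1.insert p (i : Int), PySem.Set.discard st.2 p))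
      (pos, pending)
    pvScan low buckets (i + 1) st.2 st.1
  else pos
termination_by low.length - i
decreasing_by omega

def find_city_hits_alt (text : String) (target_cities : List String) : List (List (String × String)) :=
  if text.toList = [] then []
  else
    let low := PySem.Chars.lower text.toList
    let pending := PySem.Set.ofList (target_cities.map (fun c => PySem.Chars.lower c.toList))
    -- 'if "" in pending: pos[""] = 0; pending.discard("")'
    let pos0 := if pending.contains [] then PySem.Dict.empty.insert ([] : List Char) (0 : Int)
      else PySem.Dict.empty
    let pending0 := if pending.contains [] then PySem.Set.discard pending [] else pending
    -- 'for p in pending: buckets.setdefault(p[0], []).append(p)'; p[0] is p.headI (p ≠ "" here)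
    let buckets := pending0.foldl (fun b q => b.modify q.headI [] (· ++ [q])) PySem.Dict.empty
    let pos := pvScan low buckets 0 pending0 pos0
    -- 'pos[city.lower()]' is read as get?+getD: the comprehension's filter guarantees the key
    (target_cities.filter (fun city => pos.contains (PySem.Chars.lower city.toList))).map
      (fun city =>
        let start := (pos.get? (PySem.Chars.lower city.toList)).getD 0
        let lo := max 0 (start - 50)
        let hi := min (text.toList.length : Int) (start + (city.toList.length : Int) + 50)
        [("value", city), ("snippet", String.ofList (PySem.Chars.strip
          (PySem.List.slice text.toList (some lo) (some hi))))])

-- ===== PRECONDITION & SPEC =====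
def Spec_find_city_hits (text : String) (target_cities : List String) (out : List (List (String × String))) : Prop := out = find_city_hits_alt text target_cities
instance (text : String) (target_cities : List String) (out : List (List (String × String))) : Decidable (Spec_find_city_hits text target_cities out) := by unfold Spec_find_city_hits; infer_instance

-- ===== CLAIM (what is proved, stated in full; the proofs are below) =====
def Claim_equal_find_city_hits : Prop := ∀ (text : String) (target_cities : List String), Dom_find_city_hits text target_cities → Spec_find_city_hits text target_cities (find_city_hits text target_cities)

-- ===== LEMMAS AND PROOFS =====

-- first j with i ≤ j < low.length at which p is a prefix of low.drop j (proof-side helper)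
def pvFirstMatch (low p : List Char) (i : Nat) : Option Nat :=
  if h : i < low.length then
    if p <+: low.drop i then some i else pvFirstMatch low p (i + 1)
  else none
termination_by low.length - i
decreasing_by omega

theorem pv_fold_get_notmem (hits : List (List Char)) (pos : PySem.Dict (List Char) Int)
    (i : Int) (p : List Char) (h : p ∉ hits) :
    (hits.foldl (fun d q => d.insert q i) pos).get? p = pos.get? p := by
  induction hits generalizing pos with
  | nil => rfl
  | cons a t ih =>
    simp only [List.mem_cons, not_or] at h
    simp only [List.foldl_cons, ih _ h.2, PySem.Dict.get?_insert_of_ne _ _ h.1]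

theorem pv_fold_get_mem (hits : List (List Char)) (pos : PySem.Dict (List Char) Int)
    (i : Int) (p : List Char) (hnd : hits.Nodup) (h : p ∈ hits) :
    (hits.foldl (fun d q => d.insert q i) pos).get? p = some i := by
  induction hits generalizing pos with
  | nil => simp at h
  | cons a t ih =>
    simp only [List.nodup_cons] at hnd
    rcases List.mem_cons.mp h with rfl | hmem
    · simp only [List.foldl_cons, pv_fold_get_notmem t _ i p hnd.1, PySem.Dict.get?_insert_self]
    · exact ih _ hnd.2 hmem

theorem pv_mem_fold_discard (hits : List (List Char)) (s : PySem.Set (List Char)) (q : List Char) :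
    q ∈ hits.foldl (fun s p => PySem.Set.discard s p) s ↔ q ∈ s ∧ q ∉ hits := by
  induction hits generalizing s with
  | nil => simp
  | cons a t ih =>
    simp only [List.foldl_cons, ih, PySem.Set.mem_discard, List.mem_cons]
    tauto

theorem pv_nodup_fold_discard (hits : List (List Char)) (s : PySem.Set (List Char))
    (hs : s.Nodup) : (hits.foldl (fun s p => PySem.Set.discard s p) s).Nodup := by
  induction hits generalizing s with
  | nil => exact hs
  | cons a t ih => exact ih _ (PySem.Set.nodup_discard _ _ hs)

theorem pvFirstMatch_none_iff (low p : List Char) (i : Nat) :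
    pvFirstMatch low p i = none ↔ ∀ j, i ≤ j → j < low.length → ¬ p <+: low.drop j := by
  induction i using pvFirstMatch.induct (low := low) (p := p) with
  | case1 x hx hpre =>
    rw [pvFirstMatch, dif_pos hx, if_pos hpre]
    simp only [reduceCtorEq, false_iff]
    exact fun hall => hall x le_rfl hx hpre
  | case2 x hx hpre ih =>
    rw [pvFirstMatch, dif_pos hx, if_neg hpre, ih]
    constructor
    · intro hall j hij hjl hpj
      rcases Nat.eq_or_lt_of_le hij with rfl | hlt
      · exact hpre hpj
      · exact hall j hlt hjl hpj
    · exact fun hall j hij hjl => hall j (Nat.le_of_succ_le hij) hjl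
  | case3 x hx =>
    rw [pvFirstMatch, dif_neg hx]
    simp only [true_iff]
    intro j _ hjl
    omega

theorem pvFirstMatch_some_spec (low p : List Char) (i j : Nat)
    (h : pvFirstMatch low p i = some j) :
    i ≤ j ∧ j < low.length ∧ p <+: low.drop j ∧
      ∀ k, i ≤ k → k < j → ¬ p <+: low.drop k := by
  induction i using pvFirstMatch.induct (low := low) (p := p) with
  | case1 x hx hpre =>
    rw [pvFirstMatch, dif_pos hx, if_pos hpre] at h
    cases h
    exact ⟨le_rfl, hx, hpre, fun k hik hkj => by omega⟩
  | case2 x hx hpre ih =>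
    rw [pvFirstMatch, dif_pos hx, if_neg hpre] at h
    obtain ⟨h1, h2, h3, h4⟩ := ih h
    refine ⟨by omega, h2, h3, fun k hik hkj hpk => ?_⟩
    rcases Nat.eq_or_lt_of_le hik with rfl | hlt2
    · exact hpre hpk
    · exact h4 k hlt2 hkj hpk
  | case3 x hx =>
    rw [pvFirstMatch, dif_neg hx] at h
    cases h

theorem pvFirstMatch_eq_find (low p : List Char) (hlow : low ≠ []) :
    pvFirstMatch low p 0 =
      if PySem.Chars.isIn p low then some (PySem.Chars.find low p).toNat else none := by
  by_cases hin : PySem.Chars.isIn p low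
  · rw [if_pos hin]
    have hnn : 0 ≤ PySem.Chars.find low p := (PySem.Chars.find_nonneg_iff low p).mpr
      ((PySem.Chars.isIn_iff_infix p low).mp hin)
    obtain ⟨hprefF, hminF⟩ := PySem.Chars.find_spec hnn
    have hle : PySem.Chars.find low p ≤ low.length := PySem.Chars.find_le_length low p
    have hltF : (PySem.Chars.find low p).toNat < low.length := by
      rcases Nat.lt_or_ge (PySem.Chars.find low p).toNat low.length with hlt | hge
      · exact hlt
      · exfalso
        have heq : (PySem.Chars.find low p).toNat = low.length := by omega
        rw [heq, List.drop_length] at hprefF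
        have hpnil : p = [] := List.prefix_nil.mp hprefF
        have h0 : PySem.Chars.find low p = 0 := by rw [hpnil]; exact PySem.Chars.find_nil low
        rw [h0] at heq
        have : low.length ≠ 0 := fun hl => hlow (List.length_eq_zero_iff.mp hl)
        omega
    cases hm : pvFirstMatch low p 0 with
    | none =>
      exfalso
      exact (pvFirstMatch_none_iff low p 0).mp hm _ (Nat.zero_le _) hltF hprefF
    | some j =>
      obtain ⟨_, hjl, hprefj, hminj⟩ := pvFirstMatch_some_spec low p 0 j hm
      have h1 : ¬ j < (PySem.Chars.find low p).toNat := fun hlt => hminF j hlt hprefj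
      have h2 : ¬ (PySem.Chars.find low p).toNat < j :=
        fun hlt => hminj _ (Nat.zero_le _) hlt hprefF
      have : j = (PySem.Chars.find low p).toNat := by omega
      rw [this]
  · rw [if_neg hin, pvFirstMatch_none_iff]
    intro j _ _ hpj
    exact hin ((PySem.Chars.exists_prefix_drop_iff_isIn p low).mp ⟨j, hpj⟩)

theorem pvScan_get_notmem (low : List Char) (buckets : PySem.Dict Char (List (List Char)))
    (i : Nat) (pending : PySem.Set (List Char)) (pos : PySem.Dict (List Char) Int)
    (p : List Char) (hp : p ∉ pending) :
    (pvScan low buckets i pending pos).get? p = pos.get? p := by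
  obtain ⟨n, hn⟩ : ∃ n, low.length - i ≤ n := ⟨_, le_rfl⟩
  induction n generalizing i pending pos with
  | zero =>
    rw [pvScan, dif_neg (by omega)]
  | succ n ih =>
    rw [pvScan]
    by_cases h : i < low.length ∧ pending ≠ []
    · rw [dif_pos h]
      simp only []
      rw [PySem.List.foldl_prod_mk
        (f := fun (d : PySem.Dict (List Char) Int) (q : List Char) => d.insert q (i : Int))
        (g := fun (s : PySem.Set (List Char)) (q : List Char) => PySem.Set.discard s q)]
      set found := (buckets.getD (low[i]'h.1) []).filter
        (fun q => pending.contains q && PySem.Chars.startswith (low.drop i) q) with hfd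
      have hf : p ∉ found := fun hmem => by
        have hc := (List.mem_filter.mp hmem).2
        rw [Bool.and_eq_true] at hc
        exact hp ((PySem.Set.contains_iff pending p).mp hc.1)
      have hp2 : p ∉ found.foldl (fun s q => PySem.Set.discard s q) pending :=
        fun hmem => hp ((pv_mem_fold_discard _ _ _).mp hmem).1
      rw [ih (i + 1) _ _ hp2 (by omega)]
      exact pv_fold_get_notmem _ _ _ _ hf
    · rw [dif_neg h]

theorem pvScan_get_mem (low : List Char) (buckets : PySem.Dict Char (List (List Char)))
    (i : Nat) (pending : PySem.Set (List Char)) (pos : PySem.Dict (List Char) Int)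
    (p : List Char) (hnd : pending.Nodup) (hp : p ∈ pending) (hpne : p ≠ [])
    (hbkp : p ∈ buckets.getD p.headI []) (hbknd : ∀ c, (buckets.getD c []).Nodup) :
    (pvScan low buckets i pending pos).get? p =
      match pvFirstMatch low p i with
      | some j => some (j : Int)
      | none => pos.get? p := by
  obtain ⟨n, hn⟩ : ∃ n, low.length - i ≤ n := ⟨_, le_rfl⟩
  induction n generalizing i pending pos with
  | zero =>
    rw [pvScan, dif_neg (by omega), pvFirstMatch, dif_neg (by omega)]
  | succ n ih =>
    have hne : pending ≠ [] := by rintro rfl; simp at hp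
    by_cases hi : i < low.length
    · rw [pvScan, dif_pos ⟨hi, hne⟩, pvFirstMatch, dif_pos hi]
      simp only []
      rw [PySem.List.foldl_prod_mk
        (f := fun (d : PySem.Dict (List Char) Int) (q : List Char) => d.insert q (i : Int))
        (g := fun (s : PySem.Set (List Char)) (q : List Char) => PySem.Set.discard s q)]
      set found := (buckets.getD (low[i]'hi) []).filter
        (fun q => pending.contains q && PySem.Chars.startswith (low.drop i) q) with hfd
      by_cases hpre : p <+: low.drop i
      · -- p starts at position i: it is in the bucket of low[i], recorded, and removed
        rw [if_pos hpre]
        have hdrop : low.drop i = low[i] :: low.drop (i + 1) := List.drop_eq_getElem_cons hi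
        have hhead : p.headI = low[i] := by
          obtain ⟨a, t, rfl⟩ : ∃ a t, p = a :: t := by
            cases p with
            | nil => exact absurd rfl hpne
            | cons a t => exact ⟨a, t, rfl⟩
          rw [hdrop] at hpre
          obtain ⟨u, hu⟩ := hpre
          simp only [List.cons_append] at hu
          simp [List.headI, (List.cons.injEq .. ▸ hu).1]
        have hfound : p ∈ found := by
          rw [hfd]
          refine List.mem_filter.mpr ⟨by rw [← hhead]; exact hbkp, ?_⟩
          rw [Bool.and_eq_true, PySem.Set.contains_eq_listContains]
          exact ⟨by simpa using hp, by simpa [PySem.Chars.startswith_iff] using hpre⟩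
        have hp2 : p ∉ found.foldl (fun s q => PySem.Set.discard s q) pending :=
          fun hmem => ((pv_mem_fold_discard _ _ _).mp hmem).2 hfound
        rw [pvScan_get_notmem _ _ _ _ _ _ hp2]
        exact pv_fold_get_mem _ _ _ _ (List.Nodup.filter _ (hbknd _)) hfound
      · -- p does not start at i: untouched and still pending
        rw [if_neg hpre]
        have hnf : p ∉ found := fun hmem => by
          have hc := (List.mem_filter.mp hmem).2
          rw [Bool.and_eq_true, PySem.Chars.startswith_iff] at hc
          exact hpre hc.2
        have hp2 : p ∈ found.foldl (fun s q => PySem.Set.discard s q) pending :=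
          (pv_mem_fold_discard _ _ _).mpr ⟨hp, hnf⟩
        have hnd2 : (found.foldl (fun s q => PySem.Set.discard s q) pending).Nodup :=
          pv_nodup_fold_discard _ _ hnd
        rw [ih (i + 1) _ _ hnd2 hp2 (by omega)]
        have hkeep : (found.foldl (fun d q => d.insert q (i : Int)) pos).get? p = pos.get? p :=
          pv_fold_get_notmem _ _ _ _ hnf
        cases pvFirstMatch low p (i + 1) <;> simp [hkeep]
    · rw [pvScan, dif_neg (by tauto), pvFirstMatch, dif_neg hi]

-- the bucket table: the bucket of c holds exactly the patterns whose first character is c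
theorem pvBuckets_getD (l : List (List Char)) (c : Char) :
    (l.foldl (fun b q => b.modify q.headI [] (· ++ [q])) PySem.Dict.empty).getD c [] =
      l.filter (fun q => q.headI == c) := by
  have hm : l.foldl (fun b q => b.modify q.headI [] (· ++ [q])) PySem.Dict.empty =
      (l.map (fun q => (q.headI, q))).foldl
        (fun b r => b.modify r.1 [] (· ++ [r.2])) PySem.Dict.empty := by
    rw [List.foldl_map]
  rw [hm, PySem.Dict.getD_foldl_modify_append, List.filter_map]
  simp [List.map_map, Function.comp_def]

theorem pvPos_get (low : List Char) (patterns : List (List Char)) (p : List Char)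
    (hlow : low ≠ []) (hp : p ∈ patterns) :
    (pvScan low
        ((if (PySem.Set.ofList patterns).contains [] then
            PySem.Set.discard (PySem.Set.ofList patterns) []
          else PySem.Set.ofList patterns).foldl
          (fun b q => b.modify q.headI [] (· ++ [q])) PySem.Dict.empty)
        0
        (if (PySem.Set.ofList patterns).contains [] then
          PySem.Set.discard (PySem.Set.ofList patterns) []
        else PySem.Set.ofList patterns)
        (if (PySem.Set.ofList patterns).contains [] then
          PySem.Dict.empty.insert ([] : List Char) (0 : Int)
        else PySem.Dict.empty)).get? p =
      if PySem.Chars.isIn p low then some (PySem.Chars.find low p) else none := by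
  set P := PySem.Set.ofList patterns with hP
  have hPnd : P.Nodup := PySem.Set.nodup_ofList patterns
  have hPmem : p ∈ P := (PySem.Set.mem_ofList patterns p).mpr hp
  by_cases hpne : p = []
  · -- the empty pattern is pre-recorded at position 0 and never touched by the scan
    subst hpne
    have hc : P.contains [] = true := (PySem.Set.contains_iff P []).mpr hPmem
    simp only [hc, if_true]
    have hnotmem : ([] : List Char) ∉ PySem.Set.discard P [] :=
      fun hmem => ((PySem.Set.mem_discard P [] []).mp hmem).2 rfl
    rw [pvScan_get_notmem _ _ _ _ _ _ hnotmem, PySem.Dict.get?_insert_self]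
    rw [if_pos (PySem.Chars.isIn_nil low), PySem.Chars.find_nil]
  · have hmem0 : p ∈ (if P.contains [] then PySem.Set.discard P [] else P) := by
      split
      · exact (PySem.Set.mem_discard P [] p).mpr ⟨hPmem, hpne⟩
      · exact hPmem
    have hnd0 : (if P.contains [] then PySem.Set.discard P [] else P).Nodup := by
      split
      · exact PySem.Set.nodup_discard P [] hPnd
      · exact hPnd
    rw [pvScan_get_mem _ _ _ _ _ _ hnd0 hmem0 hpne
      (by rw [pvBuckets_getD]; exact List.mem_filter.mpr ⟨hmem0, by simp⟩)
      (fun c => by rw [pvBuckets_getD]; exact List.Nodup.filter _ hnd0)]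
    rw [pvFirstMatch_eq_find low p hlow]
    have hpos0 : (if P.contains [] then
        PySem.Dict.empty.insert ([] : List Char) (0 : Int) else PySem.Dict.empty).get? p =
        none := by
      split
      · rw [PySem.Dict.get?_insert_of_ne _ _ hpne, PySem.Dict.get?_empty]
      · rw [PySem.Dict.get?_empty]
    by_cases hin : PySem.Chars.isIn p low
    · have hnn : 0 ≤ PySem.Chars.find low p := (PySem.Chars.find_nonneg_iff low p).mpr
        ((PySem.Chars.isIn_iff_infix p low).mp hin)
      simp [hin, Int.toNat_of_nonneg hnn]
    · simp only [if_neg hin]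
      exact hpos0

-- ===== VERDICT (by name: the statement is the Claim_ definition above) =====
theorem find_city_hits_spec : Claim_equal_find_city_hits := by
  intro text target_cities _
  unfold Spec_find_city_hits
  unfold find_city_hits find_city_hits_alt
  by_cases hnil : text.toList = []
  · simp [hnil]
  · rw [if_neg hnil, if_neg hnil]
    have hlow : PySem.Chars.lower text.toList ≠ [] := by
      intro h
      have hl := congrArg List.length h
      simp only [PySem.Chars.lower, List.length_map, List.length_nil] at hl
      exact hnil (List.length_eq_zero_iff.mp hl)
    simp only []
    rw [PySem.List.foldl_append_if]
    rw [List.nil_append]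
    have hget := fun (city : String) (hcity : city ∈ target_cities) =>
      pvPos_get (PySem.Chars.lower text.toList)
        (target_cities.map (fun c => PySem.Chars.lower c.toList))
        (PySem.Chars.lower city.toList) hlow (List.mem_map.mpr ⟨city, hcity, rfl⟩)
    have hfil : target_cities.filter
          (fun city => PySem.Chars.isIn (PySem.Chars.lower city.toList)
            (PySem.Chars.lower text.toList)) =
        target_cities.filter (fun city =>
          (pvScan (PySem.Chars.lower text.toList)
            ((if (PySem.Set.ofList
                  (target_cities.map (fun c => PySem.Chars.lower c.toList))).contains [] then
                PySem.Set.discard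
                  (PySem.Set.ofList (target_cities.map (fun c => PySem.Chars.lower c.toList))) []
              else PySem.Set.ofList
                (target_cities.map (fun c => PySem.Chars.lower c.toList))).foldl
              (fun b q => b.modify q.headI [] (· ++ [q])) PySem.Dict.empty)
            0
            (if (PySem.Set.ofList
                (target_cities.map (fun c => PySem.Chars.lower c.toList))).contains [] then
              PySem.Set.discard
                (PySem.Set.ofList (target_cities.map (fun c => PySem.Chars.lower c.toList))) []
            else PySem.Set.ofList (target_cities.map (fun c => PySem.Chars.lower c.toList)))
            (if (PySem.Set.ofList
                (target_cities.map (fun c => PySem.Chars.lower c.toList))).contains [] then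
              PySem.Dict.empty.insert ([] : List Char) (0 : Int)
            else PySem.Dict.empty)).contains (PySem.Chars.lower city.toList)) := by
      refine List.filter_congr (fun city hcity => ?_)
      rw [PySem.Dict.contains_eq_isSome_get?, hget city hcity]
      by_cases hin : PySem.Chars.isIn (PySem.Chars.lower city.toList)
          (PySem.Chars.lower text.toList) <;> simp [hin]
    rw [← hfil]
    refine List.map_congr_left (fun city hcity => ?_)
    have hmem := List.mem_filter.mp hcity
    rw [hget city hmem.1, if_pos hmem.2]
    rfl
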